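-- pv_equiv track=rewrite | github.com/P4v4n5/my_projects | Computer_Networks/Knapsack_Encryption/test/super_increasing.py | generate_superincreasing_knapsack
-- ===== SOURCE A (Python) =====
-- def generate_superincreasing_knapsack(n):
--     knapsack = []
--     total = 0
--     for i in range(n):
--         element = total + 1  # Make sure the next element is greater than the sum of previous elements
--         knapsack.append(element)
--         total += element
--     return knapsack
-- ===== SOURCE B (Python) =====
-- def generate_superincreasing_knapsack(n):
--     # Closed form: the running-sum recurrence yields exactly the powers of two,
--     # so each element is computed independently from its index, no accumulator.
--     return [1 << i for i in range(n)]
-- ===== Notes on version B (the rewrite author's own statement) =====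
-- stated objective: simpler
-- what changed: Replaced the running-total accumulator loop by the closed form 2**i: each element is computed independently from its index (1 << i), with no state carried between iterations.
import Mathlib
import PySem

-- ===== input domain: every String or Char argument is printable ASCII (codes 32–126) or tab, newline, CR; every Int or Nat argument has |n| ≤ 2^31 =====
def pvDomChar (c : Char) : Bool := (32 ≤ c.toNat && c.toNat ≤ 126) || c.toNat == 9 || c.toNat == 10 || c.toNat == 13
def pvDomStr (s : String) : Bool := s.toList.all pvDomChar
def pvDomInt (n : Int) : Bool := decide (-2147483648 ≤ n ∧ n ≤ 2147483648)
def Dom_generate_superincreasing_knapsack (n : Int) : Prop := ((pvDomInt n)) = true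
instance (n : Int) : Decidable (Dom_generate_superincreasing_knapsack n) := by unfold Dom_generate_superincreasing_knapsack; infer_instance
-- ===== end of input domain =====

-- B replaces A's running-total loop by the closed form 2**i per index (simpler; same values).
-- ===== PORT A =====
-- for i in range(n): element = total+1; knapsack.append(element); total += element
def generate_superincreasing_knapsack (n : Int) : List Int :=
  (PySem.List.pyRange 0 n 1).foldl
    (fun (s : List Int × Int) _ =>
      let element := s.2 + 1
      (s.1 ++ [element], s.2 + element))
    ([], 0) |>.1

-- ===== PORT B =====
-- [1 << i for i in range(n)]; every i in range(n) is nonnegative, so 1 << i = 2 ^ i.toNat exactly.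
def generate_superincreasing_knapsack_alt (n : Int) : List Int :=
  (PySem.List.pyRange 0 n 1).map (fun i => (2 : Int) ^ i.toNat)

-- ===== PRECONDITION & SPEC =====
def Spec_generate_superincreasing_knapsack (n : Int) (out : List Int) : Prop := out = generate_superincreasing_knapsack_alt n
instance (n : Int) (out : List Int) : Decidable (Spec_generate_superincreasing_knapsack n out) := by unfold Spec_generate_superincreasing_knapsack; infer_instance

-- ===== CLAIM (what is proved, stated in full; the proofs are below) =====
def Claim_equal_generate_superincreasing_knapsack : Prop := ∀ (n : Int), Dom_generate_superincreasing_knapsack n → Spec_generate_superincreasing_knapsack n (generate_superincreasing_knapsack n)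

-- ===== LEMMAS AND PROOFS =====

-- ===== VERDICT (by name: the statement is the Claim_ definition above) =====
-- Loop invariant: after m iterations the accumulator list is the first m powers of two
-- and the running total is 2^m - 1; the loop body ignores the range element.
theorem ks_foldl_inv (L m : Nat) :
    (List.foldl
      (fun (s : List Int × Int) (_ : Int) =>
        let element := s.2 + 1
        (s.1 ++ [element], s.2 + element))
      ((List.range m).map (fun k => (2 : Int) ^ k), (2 : Int) ^ m - 1)
      (List.replicate L (0 : Int)))
    = ((List.range (m + L)).map (fun k => (2 : Int) ^ k), (2 : Int) ^ (m + L) - 1) := by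
  induction L generalizing m with
  | zero => simp
  | succ L ih =>
    rw [List.replicate_succ, List.foldl_cons]
    have h2 : ((2:Int)^m - 1) + 1 = 2^m := by ring
    have := ih (m + 1)
    simp only [List.range_succ, List.map_append, List.map] at this ⊢
    simp only [h2]
    have h3 : (2:Int)^m - 1 + 2^m = 2^(m+1) - 1 := by rw [pow_succ]; ring
    rw [h3]
    rw [this]
    have h4 : m + 1 + L = m + (L + 1) := by omega
    rw [h4]

theorem foldl_const_of_ignore {β : Type} (f : β → Int → β) (g : β → β)
    (hf : ∀ s i, f s i = g s) (b : β) (l : List Int) :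
    List.foldl f b l = List.foldl f b (List.replicate l.length 0) := by
  induction l generalizing b with
  | nil => rfl
  | cons x xs ih =>
    rw [List.length_cons, List.replicate_succ, List.foldl_cons, List.foldl_cons, hf, hf, ih]

theorem generate_superincreasing_knapsack_spec : Claim_equal_generate_superincreasing_knapsack := by
  intro n _
  unfold Spec_generate_superincreasing_knapsack
  unfold generate_superincreasing_knapsack generate_superincreasing_knapsack_alt
  rw [PySem.List.pyRange_one]
  have hrep := foldl_const_of_ignore
    (fun (s : List Int × Int) (_ : Int) =>
      let element := s.2 + 1
      (s.1 ++ [element], s.2 + element))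
    (fun s => (s.1 ++ [s.2 + 1], s.2 + (s.2 + 1)))
    (fun s i => rfl) ([], 0) ((List.range (n - 0).toNat).map (fun k : Nat => (0:Int) + (k:Int)))
  rw [hrep]
  have h0 : (([] : List Int), (0:Int)) =
      ((List.range 0).map (fun k => (2 : Int) ^ k), (2 : Int) ^ 0 - 1) := by simp
  rw [List.length_map, List.length_range, h0, ks_foldl_inv]
  simp [List.map_map, Function.comp]
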